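-- pv_equiv track=rewrite | github.com/OlyaPetrova/2018-2-level-labs | lab_4/main.py | clean_tokenize_corpus
-- ===== SOURCE A (Python) =====
-- def clean_tokenize_corpus(texts: list) -> list:
--     pass
--     token_corpus = []
--     if texts and isinstance(texts, list):
--         for o_text in texts:
--             if o_text and isinstance(o_text, str):
--                 while '<br/>' in o_text:
--                     o_text = o_text.replace('<br/>', ' ')
--                 token_texts = []
--                 itog_text = o_text.split(' ')
--                 for element in itog_text:
--                     element = element.lower()
--                     new_element = ''
--                     if not element.isalpha():
--                         for i in element:
--                             if i.isalpha():
--                                 new_element += i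
--                         if new_element:
--                             token_texts.append(new_element.lower())
--                     else:
--                         token_texts.append(element.lower())
--                 token_corpus += [token_texts]
--         return token_corpus
--     else:
--         return token_corpus
-- ===== SOURCE B (Python) =====
-- def clean_tokenize_corpus(texts: list) -> list:
--     token_corpus = []
--     for o_text in texts:
--         if o_text and isinstance(o_text, str):
--             text = o_text.replace('<br/>', ' ').lower()
--             tokens = []
--             word = ''
--             for ch in text:
--                 if ch == ' ':
--                     if word:
--                         tokens.append(word)
--                         word = ''
--                 elif ch.isalpha():
--                     word += ch
--             if word:
--                 tokens.append(word)
--             token_corpus.append(tokens)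
--     return token_corpus
-- ===== Notes on version B (the rewrite author's own statement) =====
-- stated objective: simpler
-- what changed: Replaces A's split-on-space plus per-piece isalpha branch and inner filtering loop by a single character scan over the lowercased text that maintains a current-word buffer, flushing it on spaces; one pass, no intermediate piece list, no redundant while-replace loop.
import Mathlib
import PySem

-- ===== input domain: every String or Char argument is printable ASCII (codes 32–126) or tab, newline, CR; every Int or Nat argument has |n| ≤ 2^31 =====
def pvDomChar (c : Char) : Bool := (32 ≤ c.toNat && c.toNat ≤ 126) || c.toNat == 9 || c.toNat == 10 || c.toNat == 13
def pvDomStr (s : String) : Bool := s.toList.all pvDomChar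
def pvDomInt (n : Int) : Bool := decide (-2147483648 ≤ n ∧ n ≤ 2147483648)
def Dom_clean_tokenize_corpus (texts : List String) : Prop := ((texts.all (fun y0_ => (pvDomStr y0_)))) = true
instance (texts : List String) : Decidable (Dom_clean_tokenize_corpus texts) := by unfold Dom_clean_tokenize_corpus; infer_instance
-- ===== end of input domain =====

-- B replaces A's split-on-space + per-piece isalpha branch + inner filter loop by one character
-- scan over the lowercased text with a current-word buffer, flushed on spaces (objective: simpler).

-- ===== PORT A =====
-- Helpers A's port needs for the termination of Python's `while '<br/>' in o_text:` loop:
-- `repBr l` is what one `l.replace('<br/>', ' ')` computes (proved equal to PySem.Chars.replace).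
def brL : List Char := ['<', 'b', 'r', '/', '>']

def repBr : List Char → List Char
  | [] => []
  | c :: t =>
    if brL.isPrefixOf (c :: t) then ' ' :: repBr (List.drop 4 t)
    else c :: repBr t
termination_by l => l.length
decreasing_by
  · simp only [List.length_drop, List.length_cons]; omega
  · simp only [List.length_cons]; omega

theorem replace_go_eq : ∀ (fuel : Nat) (l acc : List Char), l.length ≤ fuel →
    PySem.Chars.replace.go brL [' '] fuel l acc = acc.reverse ++ repBr l := by
  intro fuel
  induction fuel with
  | zero =>
    intro l acc h
    have : l = [] := by cases l <;> simp_all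
    subst this
    simp [PySem.Chars.replace.go, repBr]
  | succ n ih =>
    intro l acc h
    cases l with
    | nil => simp [PySem.Chars.replace.go, repBr]
    | cons c t =>
      rw [PySem.Chars.replace.go]
      have hdrop : List.drop brL.length (c :: t) = List.drop 4 t := by
        show List.drop 5 (c :: t) = _; simp [List.drop_succ_cons]
      by_cases hp : brL.isPrefixOf (c :: t) = true
      · rw [if_pos hp, hdrop]
        rw [ih]
        · rw [repBr, if_pos hp]
          simp
        · have hlen : brL.length ≤ (c :: t).length := (List.isPrefixOf_iff_prefix.mp hp).length_le
          simp only [List.length_cons] at hlen h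
          have : brL.length = 5 := rfl
          rw [this] at hlen
          simp only [List.length_drop]
          omega
      · rw [if_neg hp]
        rw [ih t (c :: acc) (by simp only [List.length_cons] at h; omega)]
        rw [repBr, if_neg hp]
        simp

theorem replace_eq_repBr (s : List Char) : PySem.Chars.replace s brL [' '] = repBr s := by
  rw [PySem.Chars.replace]
  rw [if_neg (by simp [brL])]
  simpa using replace_go_eq s.length s [] le_rfl

theorem repBr_length_le (l : List Char) : (repBr l).length ≤ l.length := by
  induction l using repBr.induct with
  | case1 => simp [repBr]
  | case2 c t hp ih =>
    rw [repBr, if_pos hp]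
    simp only [List.length_cons, List.length_drop] at ih ⊢
    omega
  | case3 c t hp ih =>
    rw [repBr, if_neg hp]
    simp only [List.length_cons]
    omega

theorem repBr_length_lt (l : List Char) (h : brL <:+: l) : (repBr l).length < l.length := by
  induction l using repBr.induct with
  | case1 => simp [brL] at h
  | case2 c t hp ih =>
    rw [repBr, if_pos hp]
    have hlen : brL.length ≤ (c :: t).length := (List.isPrefixOf_iff_prefix.mp hp).length_le
    have h5 : brL.length = 5 := rfl
    rw [h5] at hlen
    have hle := repBr_length_le (List.drop 4 t)
    simp only [List.length_cons, List.length_drop] at hlen hle ⊢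
    omega
  | case3 c t hp ih =>
    rw [repBr, if_neg hp]
    rcases List.infix_cons_iff.mp h with hpre | hinf
    · exact absurd (List.isPrefixOf_iff_prefix.mpr hpre) hp
    · simp only [List.length_cons]
      exact Nat.succ_lt_succ (ih hinf)

-- the `while '<br/>' in o_text: o_text = o_text.replace('<br/>', ' ')` loop, literally
def brLoop (s : String) : String :=
  if PySem.Str.isIn "<br/>" s then brLoop (PySem.Str.replace s "<br/>" " ") else s
termination_by s.toList.length
decreasing_by
  rename_i h
  have h' : brL <:+: s.toList := by
    have := (PySem.Str.isIn_iff_infix "<br/>" s).mp h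
    simpa using this
  simp only [PySem.Str.replace, String.toList_ofList]
  have : PySem.Chars.replace s.toList "<br/>".toList " ".toList = repBr s.toList := by
    simpa using replace_eq_repBr s.toList
  rw [this]
  exact repBr_length_lt _ h'

-- A's inner `for element in itog_text:` body; `new_element` (a Python str built with +=)
-- is carried as a List Char and frozen with String.ofList on append
def stepA (token_texts : List String) (element : String) : List String :=
  let element := PySem.Str.lower element
  if ¬ (PySem.Str.strIsalpha element) then
    let new_element := element.toList.foldl
      (fun new_element i => if PySem.Chars.isalpha i then new_element ++ [i] else new_element) []
    if new_element ≠ [] then token_texts ++ [String.ofList new_element] else token_texts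
  else token_texts ++ [PySem.Str.lower element]

def tokenizeTextA (o_text : String) : List String :=
  let o_text := brLoop o_text
  let itog_text := (PySem.Str.split? o_text " ").getD []
  itog_text.foldl stepA []

def clean_tokenize_corpus (texts : List String) : List (List String) :=
  if texts ≠ [] then
    texts.foldl (fun token_corpus o_text =>
      if o_text ≠ "" then token_corpus ++ [tokenizeTextA o_text] else token_corpus) []
  else []

-- ===== PORT B =====
-- B's char scan; `word` (a Python str built with +=) is carried as a List Char
def stepB (st : List String × List Char) (ch : Char) : List String × List Char :=
  if ch = ' ' then
    (if st.2 ≠ [] then st.1 ++ [String.ofList st.2] else st.1, [])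
  else if PySem.Chars.isalpha ch then (st.1, st.2 ++ [ch])
  else st

def tokenizeTextB (o_text : String) : List String :=
  let text := PySem.Str.lower (PySem.Str.replace o_text "<br/>" " ")
  let st := text.toList.foldl stepB ([], [])
  if st.2 ≠ [] then st.1 ++ [String.ofList st.2] else st.1

def clean_tokenize_corpus_alt (texts : List String) : List (List String) :=
  texts.foldl (fun token_corpus o_text =>
    if o_text ≠ "" then token_corpus ++ [tokenizeTextB o_text] else token_corpus) []

-- ===== PRECONDITION & SPEC =====
def Spec_clean_tokenize_corpus (texts : List String) (out : List (List String)) : Prop := out = clean_tokenize_corpus_alt texts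
instance (texts : List String) (out : List (List String)) : Decidable (Spec_clean_tokenize_corpus texts out) := by unfold Spec_clean_tokenize_corpus; infer_instance

-- ===== CLAIM (what is proved, stated in full; the proofs are below) =====
def Claim_equal_clean_tokenize_corpus : Prop := ∀ (texts : List String), Dom_clean_tokenize_corpus texts → Spec_clean_tokenize_corpus texts (clean_tokenize_corpus texts)

-- ===== LEMMAS AND PROOFS =====

theorem toNat_ofNat_valid (n : Nat) (h : n < 55296) : (Char.ofNat n).toNat = n := by
  have hv : n.isValidChar := Or.inl h
  simp [Char.ofNat, hv, Char.ofNatAux, Char.toNat]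

theorem upper_bounds {c : Char} (h : PySem.Chars.isupper c = true) :
    65 ≤ c.toNat ∧ c.toNat ≤ 90 := by
  simp [PySem.Chars.isupper] at h
  obtain ⟨h1, h2⟩ := h
  exact ⟨Fin.mk_le_mk.mp h1, Fin.mk_le_mk.mp h2⟩

theorem le_iff_toNat (a b : Char) : a ≤ b ↔ a.toNat ≤ b.toNat := by
  constructor
  · exact fun h => Fin.mk_le_mk.mp h
  · intro h; exact Fin.mk_le_mk.mpr h

theorem lowerChar_space_iff (c : Char) : PySem.Chars.lowerChar c = ' ' ↔ c = ' ' := by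
  rw [PySem.Chars.lowerChar]
  by_cases h : PySem.Chars.isupper c = true
  · rw [if_pos h]
    obtain ⟨h1, h2⟩ := upper_bounds h
    constructor
    · intro he
      have hthis := congrArg Char.toNat he
      have h32 : (' ' : Char).toNat = 32 := by decide
      rw [toNat_ofNat_valid _ (by omega), h32] at hthis
      omega
    · intro he; subst he
      exact absurd h (by decide)
  · rw [if_neg h]

theorem lowerChar_idem (c : Char) :
    PySem.Chars.lowerChar (PySem.Chars.lowerChar c) = PySem.Chars.lowerChar c := by
  by_cases h : PySem.Chars.isupper c = true
  · have hu : PySem.Chars.isupper (PySem.Chars.lowerChar c) = false := by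
      obtain ⟨h1, h2⟩ := upper_bounds h
      rw [PySem.Chars.lowerChar, if_pos h]
      have ht : (Char.ofNat (c.toNat + 32)).toNat = c.toNat + 32 := toNat_ofNat_valid _ (by omega)
      simp [PySem.Chars.isupper, le_iff_toNat, ht]
      omega
    conv_lhs => rw [PySem.Chars.lowerChar, hu]
    simp
  · conv_lhs => rw [PySem.Chars.lowerChar]
    rw [PySem.Chars.lowerChar, if_neg h, if_neg h]

theorem lower_idem (l : List Char) :
    PySem.Chars.lower (PySem.Chars.lower l) = PySem.Chars.lower l := by
  simp [PySem.Chars.lower, List.map_map, Function.comp_def, lowerChar_idem]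

-- `repBr` leaves no '<br/>' behind, so A's while loop runs exactly one replace
theorem keyPre : ∀ (l : List Char), ∀ (k : Nat), k ≤ 5 → (brL.drop k) <+: repBr l → (brL.drop k) <+: l := by
  intro l
  induction l using repBr.induct with
  | case1 =>
    intro k hk h
    rw [repBr] at h
    have : brL.drop k = [] := List.prefix_nil.mp h
    simp [this]
  | case2 c t hp ih =>
    intro k hk h
    rw [repBr, if_pos hp] at h
    interval_cases k <;> simp_all [brL, List.cons_prefix_cons]
  | case3 c t hp ih =>
    intro k hk h
    rw [repBr, if_neg hp] at h
    interval_cases k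
    · rcases List.cons_prefix_cons.mp h with ⟨h1, h2⟩
      exact List.cons_prefix_cons.mpr ⟨h1, ih 1 (by omega) h2⟩
    · rcases List.cons_prefix_cons.mp h with ⟨h1, h2⟩
      exact List.cons_prefix_cons.mpr ⟨h1, ih 2 (by omega) h2⟩
    · rcases List.cons_prefix_cons.mp h with ⟨h1, h2⟩
      exact List.cons_prefix_cons.mpr ⟨h1, ih 3 (by omega) h2⟩
    · rcases List.cons_prefix_cons.mp h with ⟨h1, h2⟩
      exact List.cons_prefix_cons.mpr ⟨h1, ih 4 (by omega) h2⟩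
    · rcases List.cons_prefix_cons.mp h with ⟨h1, h2⟩
      exact List.cons_prefix_cons.mpr ⟨h1, ih 5 (by omega) h2⟩
    · simp [brL]

theorem noBr : ∀ (l : List Char), ¬ brL <:+: repBr l := by
  intro l
  induction l using repBr.induct with
  | case1 => simp [repBr, brL]
  | case2 c t hp ih =>
    rw [repBr, if_pos hp]
    intro h
    rcases List.infix_cons_iff.mp h with hpre | hinf
    · exact absurd (List.cons_prefix_cons.mp hpre).1 (by decide)
    · exact ih hinf
  | case3 c t hp ih =>
    intro h
    rw [repBr, if_neg hp] at h
    rcases List.infix_cons_iff.mp h with hpre | hinf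
    · have h0 : brL.drop 0 <+: repBr (c :: t) := by
        rw [repBr, if_neg hp]; exact hpre
      have h1 := keyPre (c :: t) 0 (by omega) h0
      exact hp (List.isPrefixOf_iff_prefix.mpr h1)
    · exact ih hinf

theorem repBr_id (l : List Char) (h : ¬ brL <:+: l) : repBr l = l := by
  induction l using repBr.induct with
  | case1 => rw [repBr]
  | case2 c t hp ih =>
    exact absurd ((List.isPrefixOf_iff_prefix.mp hp).isInfix) h
  | case3 c t hp ih =>
    rw [repBr, if_neg hp]
    have : ¬ brL <:+: t := fun hinf => h (List.infix_cons_iff.mpr (Or.inr hinf))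
    rw [ih this]

theorem str_replace_eq (s : String) :
    PySem.Str.replace s "<br/>" " " = String.ofList (repBr s.toList) := by
  rw [PySem.Str.replace]
  congr 1
  simpa using replace_eq_repBr s.toList

theorem brLoop_eq (s : String) : brLoop s = String.ofList (repBr s.toList) := by
  by_cases h : PySem.Str.isIn "<br/>" s = true
  · rw [brLoop, if_pos h, str_replace_eq]
    rw [brLoop, if_neg ?hno]
    case hno =>
      intro hIn
      have hthis := (PySem.Str.isIn_iff_infix _ _).mp hIn
      rw [String.toList_ofList] at hthis
      exact noBr s.toList (by simpa using hthis)
  · rw [brLoop, if_neg h]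
    have hni : ¬ brL <:+: s.toList := by
      intro hin
      exact h ((PySem.Str.isIn_iff_infix _ _).mpr (by simpa using hin))
    rw [repBr_id _ hni, String.ofList_toList]

-- split on one space, as a clean recursion
def spRec : List Char → List Char → List (List Char)
  | [], cur => [cur.reverse]
  | c :: t, cur => if c = ' ' then cur.reverse :: spRec t [] else spRec t (c :: cur)

theorem splitOn_go_eq : ∀ (fuel : Nat) (l cur : List Char) (acc : List (List Char)),
    l.length < fuel →
    PySem.Chars.splitOn.go [' '] fuel l cur acc = acc.reverse ++ spRec l cur := by
  intro fuel
  induction fuel with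
  | zero => intro l cur acc h; omega
  | succ n ih =>
    intro l cur acc h
    cases l with
    | nil => simp [PySem.Chars.splitOn.go, spRec]
    | cons c t =>
      rw [PySem.Chars.splitOn.go]
      by_cases hc : c = ' '
      · have hp : [' '].isPrefixOf (c :: t) = true := by simp [hc]
        rw [if_pos hp]
        have : List.drop [' '].length (c :: t) = t := by simp
        rw [this, ih t [] (cur.reverse :: acc) (by simp at h ⊢; omega)]
        rw [spRec, if_pos hc]
        simp
      · have hp : ¬ [' '].isPrefixOf (c :: t) = true := by
          simp [List.isPrefixOf_iff_prefix, List.cons_prefix_cons]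
          exact fun h => hc h.symm
        rw [if_neg hp, ih t (c :: cur) acc (by simp at h ⊢; omega)]
        rw [spRec, if_neg hc]

theorem splitOn_eq (l : List Char) : PySem.Chars.splitOn l [' '] = spRec l [] := by
  rw [PySem.Chars.splitOn]
  simpa using splitOn_go_eq (l.length + 1) l [] [] (by omega)

-- both of A's per-piece branches produce the filtered lowercased piece
theorem stepA_eq (toks : List String) (e : String) :
    stepA toks e =
      if ((PySem.Chars.lower e.toList).filter PySem.Chars.isalpha) = [] then toks
      else toks ++ [String.ofList ((PySem.Chars.lower e.toList).filter PySem.Chars.isalpha)] := by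
  rw [stepA]
  by_cases hA : PySem.Str.strIsalpha (PySem.Str.lower e) = true
  · simp only [hA, not_true, ite_false]
    simp only [PySem.Str.strIsalpha_eq, PySem.Str.toList_lower, PySem.Chars.strIsalpha] at hA
    obtain ⟨hne, hall⟩ := Bool.and_eq_true_iff.mp hA
    have hfe : (PySem.Chars.lower e.toList).filter PySem.Chars.isalpha = PySem.Chars.lower e.toList := by
      rw [List.filter_eq_self]
      intro a ha
      exact (List.all_eq_true.mp hall) a ha
    rw [hfe]
    rw [if_neg (by simp at hne ⊢; exact hne)]
    congr 1
    simp only [PySem.Str.lower, String.toList_ofList]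
    rw [lower_idem]
  · simp only [hA]
    have hfold : ∀ (l : List Char) (acc : List Char),
        l.foldl (fun new_element i => if PySem.Chars.isalpha i then new_element ++ [i] else new_element) acc
        = acc ++ l.filter PySem.Chars.isalpha := by
      intro l acc
      simpa using PySem.List.foldl_append_if PySem.Chars.isalpha id l acc
    rw [PySem.Str.toList_lower, hfold]
    simp only [List.nil_append, ne_eq, ite_not]
    by_cases hf : (PySem.Chars.lower e.toList).filter PySem.Chars.isalpha = []
    · simp [hf]
    · simp [hf]

-- the common shape: tokens produced piece by piece, the first piece continuing the buffer `pre`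
def PF : List Char → List (List Char) → List String → List String
  | _, [], toks => toks
  | pre, p :: ps, toks =>
    PF [] ps
      (if pre ++ (PySem.Chars.lower p).filter PySem.Chars.isalpha = [] then toks
       else toks ++ [String.ofList (pre ++ (PySem.Chars.lower p).filter PySem.Chars.isalpha)])

theorem foldA_eq : ∀ (ps : List (List Char)) (toks : List String),
    (ps.map String.ofList).foldl stepA toks = PF [] ps toks := by
  intro ps
  induction ps with
  | nil => intro toks; simp [PF]
  | cons p ps ih =>
    intro toks
    simp only [List.map_cons, List.foldl_cons]
    rw [stepA_eq, PF]
    simp only [String.toList_ofList, List.nil_append]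
    by_cases hf : (PySem.Chars.lower p).filter PySem.Chars.isalpha = []
    · exact ih _
    · exact ih _

def flushB (st : List String × List Char) : List String :=
  if st.2 ≠ [] then st.1 ++ [String.ofList st.2] else st.1

theorem scanB : ∀ (cs cur word : List Char) (toks : List String),
    flushB
      ((PySem.Chars.lower cs).foldl stepB
        (toks, word ++ (PySem.Chars.lower cur.reverse).filter PySem.Chars.isalpha))
    = PF word (spRec cs cur) toks := by
  intro cs
  induction cs with
  | nil =>
    intro cur word toks
    rw [spRec, PF, PF]
    simp only [PySem.Chars.lower, List.map_nil, List.foldl_nil, flushB, ne_eq, ite_not]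
  | cons c t ih =>
    intro cur word toks
    have hl : PySem.Chars.lower (c :: t) = PySem.Chars.lowerChar c :: PySem.Chars.lower t := rfl
    rw [hl, List.foldl_cons]
    by_cases hc : c = ' '
    · subst hc
      have hsp : PySem.Chars.lowerChar ' ' = ' ' := by decide
      rw [hsp]
      have hstep : stepB (toks, word ++ (PySem.Chars.lower cur.reverse).filter PySem.Chars.isalpha) ' '
          = (if word ++ (PySem.Chars.lower cur.reverse).filter PySem.Chars.isalpha = [] then toks
             else toks ++ [String.ofList (word ++ (PySem.Chars.lower cur.reverse).filter PySem.Chars.isalpha)], []) := by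
        rw [stepB, if_pos rfl]
        simp only [ne_eq, ite_not]
      rw [hstep]
      have h2 := ih [] []
        (if word ++ (PySem.Chars.lower cur.reverse).filter PySem.Chars.isalpha = [] then toks
         else toks ++ [String.ofList (word ++ (PySem.Chars.lower cur.reverse).filter PySem.Chars.isalpha)])
      simp only [List.reverse_nil, List.nil_append] at h2
      have hemp : (PySem.Chars.lower ([] : List Char)).filter PySem.Chars.isalpha = [] := rfl
      rw [hemp] at h2
      rw [h2, spRec, if_pos rfl, PF]
    · have hcl : ¬ PySem.Chars.lowerChar c = ' ' := fun h => hc ((lowerChar_space_iff c).mp h)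
      have hstep : stepB (toks, word ++ (PySem.Chars.lower cur.reverse).filter PySem.Chars.isalpha)
            (PySem.Chars.lowerChar c)
          = (toks, word ++ (PySem.Chars.lower (c :: cur).reverse).filter PySem.Chars.isalpha) := by
        rw [stepB, if_neg hcl]
        have hrev : (c :: cur).reverse = cur.reverse ++ [c] := by simp
        rw [hrev]
        have hmap : PySem.Chars.lower (cur.reverse ++ [c])
            = PySem.Chars.lower cur.reverse ++ [PySem.Chars.lowerChar c] := by
          simp [PySem.Chars.lower]
        rw [hmap, List.filter_append]
        by_cases ha : PySem.Chars.isalpha (PySem.Chars.lowerChar c) = true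
        · simp [ha, List.append_assoc]
        · simp only [Bool.not_eq_true] at ha
          simp [ha]
      rw [hstep, ih (c :: cur) word toks, spRec, if_neg hc]

theorem tokenizeTextA_eq (o : String) :
    tokenizeTextA o = PF [] (spRec (repBr o.toList) []) [] := by
  rw [tokenizeTextA, brLoop_eq]
  have hsplit : PySem.Str.split? (String.ofList (repBr o.toList)) " "
      = some ((spRec (repBr o.toList) []).map String.ofList) := by
    rw [PySem.Str.split?]
    have h1 : PySem.Chars.split? (String.ofList (repBr o.toList)).toList " ".toList
        = some (spRec (repBr o.toList) []) := by
      rw [String.toList_ofList]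
      rw [PySem.Chars.split?]
      rw [if_neg (by decide)]
      have : " ".toList = [' '] := by decide
      rw [this, splitOn_eq]
    rw [h1]
    rfl
  rw [hsplit]
  simp only [Option.getD_some]
  exact foldA_eq _ _

theorem tokenizeTextB_eq (o : String) :
    tokenizeTextB o = PF [] (spRec (repBr o.toList) []) [] := by
  show flushB ((PySem.Str.lower (PySem.Str.replace o "<br/>" " ")).toList.foldl stepB ([], []))
      = PF [] (spRec (repBr o.toList) []) []
  rw [str_replace_eq]
  have ht : (PySem.Str.lower (String.ofList (repBr o.toList))).toList
      = PySem.Chars.lower (repBr o.toList) := by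
    rw [PySem.Str.toList_lower, String.toList_ofList]
  rw [ht]
  exact scanB (repBr o.toList) [] [] []

theorem tokenizeText_eq (o : String) : tokenizeTextA o = tokenizeTextB o := by
  rw [tokenizeTextA_eq, tokenizeTextB_eq]

-- ===== VERDICT (by name: the statement is the Claim_ definition above) =====
theorem clean_tokenize_corpus_spec : Claim_equal_clean_tokenize_corpus := by
  unfold Claim_equal_clean_tokenize_corpus
  intro texts _
  unfold Spec_clean_tokenize_corpus
  rw [clean_tokenize_corpus, clean_tokenize_corpus_alt]
  have hstep : (fun (token_corpus : List (List String)) o_text =>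
        if o_text ≠ "" then token_corpus ++ [tokenizeTextA o_text] else token_corpus)
      = (fun (token_corpus : List (List String)) o_text =>
        if o_text ≠ "" then token_corpus ++ [tokenizeTextB o_text] else token_corpus) := by
    funext tc o
    rw [tokenizeText_eq]
  cases texts with
  | nil => simp
  | cons a l =>
    rw [if_pos (by simp), hstep]
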